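-- pv_equiv track=rewrite | github.com/d1tn/BlueArchive_Calc | commons/calcFunc.py | InputToArray
-- ===== SOURCE A (Python) =====
-- def InputToArray(input):
--     array =[]
--     err = []
--     length = 18
--     for i in range(len(input)//length):
--         lst = []
--         for j in range(length):
--             if input[i*length+j] == '':
--                 err.append('未入力の箇所があります。')
--                 continue
--             try:
--                 lst.append(int(input[i*length+j]))
--             except:
--                 err.append('不正な値が送信されました。')
--                 continue
--         if err == []:
--             array.append(lst)
--     return array,err
-- ===== SOURCE B (Python) =====
-- def InputToArray(input):
--     length = 18
--     rows = [input[i * length:(i + 1) * length] for i in range(len(input) // length)]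
--     err = []
--     first_bad = None
--     for idx, row in enumerate(rows):
--         bad = False
--         for cell in row:
--             if cell == '':
--                 err.append('未入力の箇所があります。')
--                 bad = True
--             else:
--                 try:
--                     int(cell)
--                 except ValueError:
--                     err.append('不正な値が送信されました。')
--                     bad = True
--         if bad and first_bad is None:
--             first_bad = idx
--     array = [[int(c) for c in row] for row in rows[:first_bad]]
--     return array, err
-- ===== Notes on version B (the rewrite author's own statement) =====
-- stated objective: alternative
-- what changed: B slices the input into 18-cell rows up front, makes one pass that collects all error messages and records the index of the first faulty row, then builds the array by converting only the clean prefix of rows (rows[:first_bad]); A instead re-derives cells by index arithmetic and re-tests the global error list after every row.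
import Mathlib
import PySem

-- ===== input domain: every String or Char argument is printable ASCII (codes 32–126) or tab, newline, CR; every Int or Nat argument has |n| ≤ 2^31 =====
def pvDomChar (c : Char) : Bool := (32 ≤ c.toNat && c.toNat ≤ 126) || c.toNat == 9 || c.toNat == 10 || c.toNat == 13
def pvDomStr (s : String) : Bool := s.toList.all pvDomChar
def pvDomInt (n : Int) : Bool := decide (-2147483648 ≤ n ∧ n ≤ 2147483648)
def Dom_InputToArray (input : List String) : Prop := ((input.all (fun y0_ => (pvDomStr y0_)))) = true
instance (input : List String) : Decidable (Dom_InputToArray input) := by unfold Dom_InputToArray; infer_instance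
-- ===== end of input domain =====

-- B re-decomposes A's index-arithmetic double loop into: slice into rows, one error-collecting pass recording the first faulty row, then convert the clean prefix; same return value, no speed claim.

-- the two Japanese error messages (shared literals of both programs)
def pvMsgEmpty : String := "未入力の箇所があります。"
def pvMsgBad : String := "不正な値が送信されました。"

-- ===== PORT A =====
-- A's inner-loop body on one cell value (lst, err)
def cellA (t : List Int × List String) (c : String) : List Int × List String :=
  if c = "" then (t.1, t.2 ++ [pvMsgEmpty])
  else
    match PySem.Int.ofStr? c with
    | some v => (t.1 ++ [v], t.2)
    | none => (t.1, t.2 ++ [pvMsgBad])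

-- indices i*18+j are always in range (i < len//18), so the `.getD ""` default is never used
def InputToArray (input : List String) : List (List Int) × List String :=
  (PySem.List.pyRange 0 (PySem.Int.floordiv (input.length : Int) 18) 1).foldl
    (fun (s : List (List Int) × List String) i =>
      let inner := (PySem.List.pyRange 0 18 1).foldl
        (fun t j => cellA t ((PySem.List.pyGet? input (i * 18 + j)).getD ""))
        (([] : List Int), s.2)
      if inner.2 = ([] : List String) then (s.1 ++ [inner.1], inner.2)
      else (s.1, inner.2))
    (([], []) : List (List Int) × List String)

-- ===== PORT B =====
-- B's inner-loop body on one cell value (err, bad)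
def cellB (t : List String × Bool) (c : String) : List String × Bool :=
  if c = "" then (t.1 ++ [pvMsgEmpty], true)
  else
    match PySem.Int.ofStr? c with
    | some _ => t
    | none => (t.1 ++ [pvMsgBad], true)

-- B's outer-loop body on one (idx, row) pair, state (err, first_bad)
def rowB (s : List String × Option Int) (p : Int × List String) : List String × Option Int :=
  let inner := p.2.foldl cellB (s.1, false)
  (inner.1, if inner.2 && s.2.isNone then some p.1 else s.2)

-- int(c) never fails on the kept rows, so the `.getD 0` default is never used
def InputToArray_alt (input : List String) : List (List Int) × List String :=
  let rows : List (List String) :=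
    (List.range (input.length / 18)).map
      (fun (i : Nat) => PySem.List.slice input (some ((i : Int) * 18)) (some (((i : Int) + 1) * 18)))
  let st := (PySem.List.enumerate rows).foldl rowB (([], none) : List String × Option Int)
  let kept : List (List String) :=
    match st.2 with
    | none => rows
    | some k => PySem.List.slice rows none (some k)
  (kept.map (fun row => row.map (fun c => (PySem.Int.ofStr? c).getD 0)), st.1)

-- ===== PRECONDITION & SPEC =====
def Spec_InputToArray (input : List String) (out : List (List Int) × List String) : Prop := out = InputToArray_alt input
instance (input : List String) (out : List (List Int) × List String) : Decidable (Spec_InputToArray input out) := by unfold Spec_InputToArray; infer_instance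

-- ===== CLAIM (what is proved, stated in full; the proofs are below) =====
def Claim_equal_InputToArray : Prop := ∀ (input : List String), Dom_InputToArray input → Spec_InputToArray input (InputToArray input)

-- ===== LEMMAS AND PROOFS =====

-- the rows both programs effectively process
def rowsOf (input : List String) : List (List String) :=
  (List.range (input.length / 18)).map (fun i => (input.drop (18 * i)).take 18)

-- the error messages one row contributes, in order
def rowErr (row : List String) : List String :=
  row.flatMap (fun c =>
    if c = "" then [pvMsgEmpty]
    else match PySem.Int.ofStr? c with
      | some _ => []
      | none => [pvMsgBad])

-- the ints A's inner loop appends (parsed cells only)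
def pInts (row : List String) : List Int :=
  row.filterMap (fun c => if c = "" then none else PySem.Int.ofStr? c)

-- the ints B's comprehension produces
def dInts (row : List String) : List Int :=
  row.map (fun c => (PySem.Int.ofStr? c).getD 0)

-- A's outer-loop body re-expressed on a row
def rowA (s : List (List Int) × List String) (row : List String) : List (List Int) × List String :=
  let inner := row.foldl cellA (([] : List Int), s.2)
  if inner.2 = ([] : List String) then (s.1 ++ [inner.1], inner.2) else (s.1, inner.2)

lemma cellA_fold (row : List String) : ∀ lst e, row.foldl cellA (lst, e) = (lst ++ pInts row, e ++ rowErr row) := by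
  induction row with
  | nil => intro lst e; simp [pInts, rowErr]
  | cons c rest ih =>
    intro lst e
    by_cases hc : c = ""
    · simp [cellA, pInts, rowErr, hc, ih]
    · cases hp : PySem.Int.ofStr? c <;> simp [cellA, pInts, rowErr, hc, hp, ih]

lemma cellB_fold (row : List String) : ∀ e b, row.foldl cellB (e, b) = (e ++ rowErr row, b || !(rowErr row).isEmpty) := by
  induction row with
  | nil => intro e b; simp [rowErr]
  | cons c rest ih =>
    intro e b
    by_cases hc : c = ""
    · simp [cellB, rowErr, hc, ih]
    · cases hp : PySem.Int.ofStr? c <;> simp [cellB, rowErr, hc, hp, ih]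

lemma clean_pInts {row : List String} (h : rowErr row = []) : pInts row = dInts row := by
  induction row with
  | nil => simp [pInts, dInts]
  | cons c rest ih =>
    have h' : rowErr (c :: rest) =
        (if c = "" then [pvMsgEmpty]
         else match PySem.Int.ofStr? c with
           | some _ => []
           | none => [pvMsgBad]) ++ rowErr rest := by
      simp only [rowErr, List.flatMap_cons]
    rw [h'] at h
    rcases List.append_eq_nil_iff.mp h with ⟨h1, h2⟩
    by_cases hc : c = ""
    · simp [hc] at h1
    · cases hp : PySem.Int.ofStr? c
      · rw [if_neg hc, hp] at h1; simp at h1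
      · have hrest := ih h2
        simp only [pInts, dInts, List.filterMap_cons, List.map_cons] at hrest ⊢
        simp [hc, hp, hrest]

lemma idxFold {α : Type} (F : α → String → α) (input : List String) :
    ∀ (cnt off : Nat), off + cnt ≤ input.length → ∀ (s : α),
      (List.range cnt).foldl (fun t (j : Nat) => F t ((PySem.List.pyGet? input ((off : Int) + (j : Int))).getD "")) s
        = ((input.drop off).take cnt).foldl F s := by
  intro cnt
  induction cnt with
  | zero => intro off h s; simp
  | succ cnt ih =>
    intro off h s
    have hoff : off < input.length := by omega
    rw [List.range_succ_eq_map, List.drop_eq_getElem_cons hoff]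
    simp only [List.foldl_cons, List.take_succ_cons, List.foldl_map]
    have h0 : (PySem.List.pyGet? input ((off : Int) + ((0 : Nat) : Int))).getD "" = input[off] := by
      simp [hoff]
    rw [h0]
    have hfun : (fun t (j : Nat) => F t ((PySem.List.pyGet? input ((off : Int) + ((Nat.succ j : Nat) : Int))).getD ""))
        = fun t (j : Nat) => F t ((PySem.List.pyGet? input (((off + 1 : Nat) : Int) + (j : Int))).getD "") := by
      funext t j
      congr 3
      simp [Nat.succ_eq_add_one]
      ring
    rw [hfun, ih (off + 1) (by omega)]

lemma innerFold (input : List String) (i : Int) (off : Nat) (hi : i * 18 = (off : Int))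
    (h : off + 18 ≤ input.length) (s : List Int × List String) :
    (PySem.List.pyRange 0 18 1).foldl (fun t j => cellA t ((PySem.List.pyGet? input (i * 18 + j)).getD "")) s
      = ((input.drop off).take 18).foldl cellA s := by
  rw [PySem.List.pyRange_one]
  have h18 : ((18 : Int) - 0).toNat = 18 := by decide
  rw [h18, List.foldl_map]
  have hfun : (fun (t : List Int × List String) (j : Nat) => cellA t ((PySem.List.pyGet? input (i * 18 + (0 + (j : Nat) : Int))).getD ""))
      = fun (t : List Int × List String) (j : Nat) => cellA t ((PySem.List.pyGet? input ((off : Int) + (j : Int))).getD "") := by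
    funext t j
    congr 3
    rw [zero_add, hi]
  rw [hfun]
  exact idxFold cellA input 18 off h s

lemma A_eq_rows (input : List String) : InputToArray input = (rowsOf input).foldl rowA ([], []) := by
  unfold InputToArray rowsOf
  have hn : PySem.Int.floordiv (input.length : Int) 18 = ((input.length / 18 : Nat) : Int) := by
    exact_mod_cast PySem.Int.floordiv_natCast input.length 18
  rw [hn, PySem.List.pyRange_zero_natCast, List.foldl_map, List.foldl_map]
  apply PySem.List.foldl_congr_mem
  intro s k hk
  have hk' : k < input.length / 18 := List.mem_range.mp hk
  have hb : 18 * k + 18 ≤ input.length := by omega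
  dsimp only
  rw [innerFold input (k : Int) (18 * k) (by push_cast; ring) hb ([], s.2)]
  rfl

lemma rowA_fold : ∀ (rows : List (List String)) (arr : List (List Int)) (e : List String),
    rows.foldl rowA (arr, e) =
      (arr ++ (if e = [] then (rows.takeWhile (fun r => (rowErr r).isEmpty)).map pInts else []),
       e ++ rows.flatMap rowErr) := by
  intro rows
  induction rows with
  | nil => intro arr e; simp
  | cons row rest ih =>
    intro arr e
    have hrow : rowA (arr, e) row =
        if e ++ rowErr row = [] then (arr ++ [pInts row], e ++ rowErr row)
        else (arr, e ++ rowErr row) := by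
      simp [rowA, cellA_fold]
    rw [List.foldl_cons, hrow]
    by_cases hr : rowErr row = []
    · by_cases he : e = []
      · rw [if_pos (by simp [he, hr])]
        rw [ih]
        simp [he, hr, List.takeWhile_cons_of_pos, List.flatMap_cons]
      · rw [if_neg (by simp [he, hr])]
        rw [ih]
        simp [he, hr, List.flatMap_cons]
    · rw [if_neg (by simp [hr])]
      rw [ih]
      have hne : ¬ (e ++ rowErr row = []) := by simp [hr]
      simp only [if_neg hne, List.append_nil, List.flatMap_cons, List.append_assoc]
      by_cases he : e = []
      · rw [List.takeWhile_cons_of_neg (p := fun r => (rowErr r).isEmpty) (by simp [hr])]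
        simp [he]
      · simp [he]

lemma rowB_fold_some : ∀ (rows : List (List String)) (s0 : Int) (k0 : Int) (e : List String),
    (PySem.List.enumerate rows s0).foldl rowB (e, some k0) = (e ++ rows.flatMap rowErr, some k0) := by
  intro rows
  induction rows with
  | nil => intro s0 k0 e; simp [PySem.List.enumerate_nil]
  | cons row rest ih =>
    intro s0 k0 e
    rw [PySem.List.enumerate_cons, List.foldl_cons]
    have : rowB (e, some k0) (s0, row) = (e ++ rowErr row, some k0) := by
      simp [rowB, cellB_fold]
    rw [this, ih]
    simp [List.flatMap_cons]

lemma rowB_fold_none : ∀ (rows : List (List String)) (k : Int) (e : List String),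
    (PySem.List.enumerate rows k).foldl rowB (e, none) =
      (e ++ rows.flatMap rowErr,
       if (rows.takeWhile (fun r => (rowErr r).isEmpty)).length = rows.length then none
       else some (k + ((rows.takeWhile (fun r => (rowErr r).isEmpty)).length : Int))) := by
  intro rows
  induction rows with
  | nil => intro k e; simp [PySem.List.enumerate_nil]
  | cons row rest ih =>
    intro k e
    rw [PySem.List.enumerate_cons, List.foldl_cons]
    by_cases hr : rowErr row = []
    · have hstep : rowB (e, none) (k, row) = (e ++ rowErr row, none) := by
        simp [rowB, cellB_fold, hr]
      rw [hstep, ih]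
      rw [List.takeWhile_cons_of_pos (by simp [hr])]
      simp only [List.flatMap_cons, List.length_cons, List.append_assoc]
      by_cases hlen : (rest.takeWhile (fun r => (rowErr r).isEmpty)).length = rest.length
      · simp [hlen]
      · have h1 : ¬ ((rest.takeWhile (fun r => (rowErr r).isEmpty)).length + 1 = rest.length + 1) := by omega
        simp only [if_neg hlen, if_neg h1]
        have hk : k + 1 + ((rest.takeWhile (fun r => (rowErr r).isEmpty)).length : Int)
            = k + (((rest.takeWhile (fun r => (rowErr r).isEmpty)).length + 1 : Nat) : Int) := by
          push_cast
          ring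
        rw [hk]
    · have hstep : rowB (e, none) (k, row) = (e ++ rowErr row, some k) := by
        simp [rowB, cellB_fold, hr]
      rw [hstep, rowB_fold_some]
      rw [List.takeWhile_cons_of_neg (by simp [hr])]
      simp [List.flatMap_cons]

lemma B_rows (input : List String) :
    (List.range (input.length / 18)).map
      (fun (i : Nat) => PySem.List.slice input (some ((i : Int) * 18)) (some (((i : Int) + 1) * 18))) = rowsOf input := by
  unfold rowsOf
  apply List.map_congr_left
  intro i _
  have h1 : ((i : Int) * 18) = ((18 * i : Nat) : Int) := by push_cast; ring
  have h2 : (((i : Int) + 1) * 18) = ((18 * i + 18 : Nat) : Int) := by push_cast; ring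
  rw [h1, h2, PySem.List.slice_natCast]
  congr 1
  omega

lemma B_val (input : List String) :
    InputToArray_alt input =
      (((rowsOf input).takeWhile (fun r => (rowErr r).isEmpty)).map dInts,
       (rowsOf input).flatMap rowErr) := by
  simp only [InputToArray_alt, B_rows, rowB_fold_none]
  by_cases hlen : ((rowsOf input).takeWhile (fun r => (rowErr r).isEmpty)).length = (rowsOf input).length
  · rw [if_pos hlen]
    have htweq : (rowsOf input).takeWhile (fun r => (rowErr r).isEmpty) = rowsOf input :=
      (List.takeWhile_prefix _).eq_of_length hlen
    rw [htweq]
    rfl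
  · rw [if_neg hlen]
    have hslice : PySem.List.slice (rowsOf input) none
        (some ((0 : Int) + (((rowsOf input).takeWhile (fun r => (rowErr r).isEmpty)).length : Int)))
        = (rowsOf input).takeWhile (fun r => (rowErr r).isEmpty) := by
      rw [zero_add, PySem.List.slice_to _ (Int.natCast_nonneg _), Int.toNat_natCast]
      exact (List.prefix_iff_eq_take.mp (List.takeWhile_prefix _)).symm
    show (List.map _ (PySem.List.slice (rowsOf input) none
        (some ((0 : Int) + (((rowsOf input).takeWhile (fun r => (rowErr r).isEmpty)).length : Int)))), _) = _
    rw [hslice]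
    rfl

-- ===== VERDICT (by name: the statement is the Claim_ definition above) =====
theorem InputToArray_spec : Claim_equal_InputToArray := by
  unfold Claim_equal_InputToArray
  intro input _
  unfold Spec_InputToArray
  rw [A_eq_rows, rowA_fold, B_val]
  simp only [List.nil_append]
  refine Prod.ext ?_ rfl
  apply List.map_congr_left
  intro r hr
  have hp := List.mem_takeWhile_imp (p := fun r => (rowErr r).isEmpty) hr
  exact clean_pInts (List.isEmpty_iff.mp (by simpa using hp))
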